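-- pv_equiv track=rewrite | github.com/mmcodesso/PARA-PROF-MAUR-CIO | items_metrics.py | count_dictionary
-- ===== SOURCE A (Python) =====
-- def count_dictionary(corpus, dictionary):
--     """
--     Returns the count of words in the given corpus that are present in the given dictionary,
--     along with a dictionary containing the count of each word in the corpus that is present in the dictionary.
--
--     Args:
--     - corpus (list): A list of words to be searched in the dictionary.
--     - dictionary (set): A set of words to be searched in the corpus.
--
--     Returns:
--     - A tuple containing two elements:
--         - The count of words in the corpus that are present in the dictionary.
--         - A dictionary containing the count of each word in the corpus that is present in the dictionary.
--     """
--     counter = 0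
--     conter_by_words = dict()
--     for word in corpus:
--         if word.lower() in dictionary:
--             counter += 1
--             conter_by_words[word] = conter_by_words.get(word,0) + 1
--     return counter, conter_by_words
-- ===== SOURCE B (Python) =====
-- def count_dictionary(corpus, dictionary):
--     # Count-then-filter-the-index: first tally EVERY corpus word (no membership
--     # tests yet), then keep only the index entries whose lowercased key is in the
--     # dictionary, and derive the total as the sum of the kept counts. Membership
--     # (and .lower()) is decided once per DISTINCT word instead of per occurrence.
--     all_counts = {}
--     for word in corpus:
--         all_counts[word] = all_counts.get(word, 0) + 1
--     counts = {w: c for w, c in all_counts.items() if w.lower() in dictionary}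
--     return sum(counts.values()), counts
-- ===== Notes on version B (the rewrite author's own statement) =====
-- stated objective: alternative
-- what changed: Instead of A's single fused pass that tests dictionary membership on every occurrence while incrementing a running total and per-word tallies, B first tallies every corpus word into an index with no membership tests, then filters the index by lowercased-key membership (once per distinct word) and totals by summing the kept counts.
import Mathlib
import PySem

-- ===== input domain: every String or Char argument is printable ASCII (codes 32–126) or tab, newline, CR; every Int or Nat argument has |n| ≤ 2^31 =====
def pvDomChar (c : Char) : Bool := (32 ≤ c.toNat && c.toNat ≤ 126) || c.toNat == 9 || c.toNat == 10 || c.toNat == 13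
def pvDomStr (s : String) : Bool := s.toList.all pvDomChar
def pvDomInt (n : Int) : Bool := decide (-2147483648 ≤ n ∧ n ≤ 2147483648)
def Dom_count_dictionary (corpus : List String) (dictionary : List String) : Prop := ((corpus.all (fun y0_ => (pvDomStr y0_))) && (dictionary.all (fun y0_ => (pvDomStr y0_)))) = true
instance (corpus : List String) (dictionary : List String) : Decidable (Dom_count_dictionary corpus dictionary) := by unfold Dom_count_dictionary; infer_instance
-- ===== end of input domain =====

-- B replaces A's fused filter-per-occurrence pass by count-everything-then-filter-the-index-then-sum:
-- dictionary membership is decided once per distinct word, not per occurrence.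

-- ===== PORT A =====
-- one pass: running total and dict updated together
def count_dictionary (corpus : List String) (dictionary : List String) : Int × (List (String × Int)) :=
  let st := corpus.foldl
    (fun (st : Int × PySem.Dict String Int) word =>
      if dictionary.contains (PySem.Str.lower word) then
        (st.1 + 1, st.2.insert word (st.2.getD word 0 + 1))
      else st)
    (0, PySem.Dict.empty)
  (st.1, st.2.items)

-- ===== PORT B =====
def count_dictionary_alt (corpus : List String) (dictionary : List String) : Int × (List (String × Int)) :=
  let all_counts := corpus.foldl
    (fun (d : PySem.Dict String Int) word => d.insert word (d.getD word 0 + 1)) PySem.Dict.empty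
  let counts := all_counts.items.filter (fun kv => dictionary.contains (PySem.Str.lower kv.1))
  ((counts.map Prod.snd).sum, counts)

-- ===== PRECONDITION & SPEC =====
def Spec_count_dictionary (corpus : List String) (dictionary : List String) (out : Int × (List (String × Int))) : Prop := out = count_dictionary_alt corpus dictionary
instance (corpus : List String) (dictionary : List String) (out : Int × (List (String × Int))) : Decidable (Spec_count_dictionary corpus dictionary out) := by unfold Spec_count_dictionary; infer_instance

-- ===== CLAIM =====
def Claim_equal_count_dictionary : Prop := ∀ (corpus : List String) (dictionary : List String), Dom_count_dictionary corpus dictionary → Spec_count_dictionary corpus dictionary (count_dictionary corpus dictionary)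

-- ===== LEMMAS AND PROOFS =====

-- A's paired fold over corpus = (count of matched so far) paired with the counting fold over the filtered list
theorem pv_fold_split (dictionary : List String) :
    ∀ (corpus : List String) (c : Int) (d : PySem.Dict String Int),
      corpus.foldl
        (fun (st : Int × PySem.Dict String Int) word =>
          if dictionary.contains (PySem.Str.lower word) then
            (st.1 + 1, st.2.insert word (st.2.getD word 0 + 1))
          else st)
        (c, d)
      = (c + ((corpus.filter (fun word => dictionary.contains (PySem.Str.lower word))).length : Int),
         (corpus.filter (fun word => dictionary.contains (PySem.Str.lower word))).foldl
           (fun (d : PySem.Dict String Int) word => d.insert word (d.getD word 0 + 1)) d) := by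
  intro corpus
  induction corpus with
  | nil => intro c d; simp
  | cons w ws ih =>
    intro c d
    by_cases h : dictionary.contains (PySem.Str.lower w)
    · simp only [List.foldl_cons, List.filter_cons, h, if_true, ih, List.length_cons,
        Nat.cast_add, Nat.cast_one, Prod.mk.injEq]
      exact ⟨by ring, trivial⟩
    · simp only [List.foldl_cons, List.filter_cons, h, if_false, Bool.false_eq_true, ih]

-- set(filter p xs) = filter p (set(xs)): first-seen dedup commutes with filtering
theorem pv_ofList_filter (p : String → Bool) :
    ∀ (xs : List String), PySem.Set.ofList (xs.filter p) = (PySem.Set.ofList xs).filter p := by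
  intro xs
  induction xs using List.reverseRecOn with
  | nil => rfl
  | append_singleton ys x ih =>
    rw [PySem.Set.ofList_append_singleton, PySem.Set.add]
    by_cases hp : p x
    · have hsplit : (ys ++ [x]).filter p = ys.filter p ++ [x] := by
        simp [List.filter_append, hp]
      rw [hsplit, PySem.Set.ofList_append_singleton, ih, PySem.Set.add]
      by_cases hc : x ∈ PySem.Set.ofList ys
      · simp [PySem.Set.contains, List.mem_filter, hc, hp]
      · simp [PySem.Set.contains, List.mem_filter, hc, hp, List.filter_append]
    · have hsplit : (ys ++ [x]).filter p = ys.filter p := by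
        simp [List.filter_append, hp]
      rw [hsplit, ih]
      by_cases hm : x ∈ ys <;> simp [PySem.Set.contains, PySem.Set.mem_ofList, hm, List.filter_append, hp]

-- B's filtered index = Counter of the filtered corpus, rendered as items
theorem pv_items_filter (p : String → Bool) (xs : List String) :
    (PySem.Dict.counter xs).items.filter (fun kv => p kv.1)
      = (PySem.Dict.counter (xs.filter p)).items := by
  rw [PySem.Dict.items_counter, PySem.Dict.items_counter, pv_ofList_filter,
      List.filter_map]
  have : ((PySem.Set.ofList xs).filter fun k => p k)
      = ((PySem.Set.ofList xs).filter ((fun kv : String × Int => p kv.1) ∘ fun k => (k, (xs.count k : Int)))) := rfl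
  rw [← this]
  apply List.map_congr_left
  intro k hk
  have hpk : p k = true := (List.mem_filter.mp hk).2
  simp [List.count_filter hpk]

-- sum of the values of Counter(xs) = xs.length
theorem pv_sum_counter (xs : List String) :
    ((PySem.Dict.counter xs).items.map Prod.snd).sum = (xs.length : Int) := by
  have hperm : (PySem.Set.ofList xs : List String).Perm xs.dedup := by
    rw [List.perm_ext_iff_of_nodup (PySem.Set.nodup_ofList xs) xs.nodup_dedup]
    intro a
    simp [PySem.Set.mem_ofList, List.mem_dedup]
  rw [PySem.Dict.items_counter, List.map_map]
  have : ((PySem.Set.ofList xs).map ((Prod.snd ∘ fun k => (k, (xs.count k : Int))))).sum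
      = ((PySem.Set.ofList xs).map (fun k => (xs.count k : Int))).sum := rfl
  rw [this, (hperm.map (fun k => (xs.count k : Int))).sum_eq]
  have : (xs.dedup.map (fun k => (xs.count k : Int))).sum
      = ((xs.dedup.map xs.count).sum : Int) := by
    rw [Nat.cast_list_sum, List.map_map]; rfl
  rw [this, List.sum_map_count_dedup_eq_length]

-- ===== VERDICT =====
theorem count_dictionary_spec : Claim_equal_count_dictionary := by
  intro corpus dictionary _
  unfold Spec_count_dictionary count_dictionary count_dictionary_alt
  rw [pv_fold_split]
  have hA : corpus.foldl
      (fun (d : PySem.Dict String Int) word => d.insert word (d.getD word 0 + 1)) PySem.Dict.empty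
      = PySem.Dict.counter corpus :=
    PySem.Dict.foldl_insert_getD_add_one_eq_counter _
  have hF : (corpus.filter (fun word => dictionary.contains (PySem.Str.lower word))).foldl
      (fun (d : PySem.Dict String Int) word => d.insert word (d.getD word 0 + 1)) PySem.Dict.empty
      = PySem.Dict.counter (corpus.filter (fun word => dictionary.contains (PySem.Str.lower word))) :=
    PySem.Dict.foldl_insert_getD_add_one_eq_counter _
  have hfilt := pv_items_filter (fun w => dictionary.contains (PySem.Str.lower w)) corpus
  have hsum := pv_sum_counter (corpus.filter (fun word => dictionary.contains (PySem.Str.lower word)))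
  simp only [hA, hF, hfilt, hsum]
  norm_num
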